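-- pv_equiv track=rewrite | github.com/vaishnavi-tg/Training_placement | Toss_and_Score.py | toss_and_score
-- ===== SOURCE A (Python) =====
-- def toss_and_score(s):
--     score = 0
--     consecutive_heads = 0
--
--     for toss in s:
--         if toss == 'H':
--             score += 2
--             consecutive_heads += 1
--             if consecutive_heads == 3:
--                 break
--         else:  # toss == 'T'
--             score -= 1
--             consecutive_heads = 0
--
--     return score
-- ===== SOURCE B (Python) =====
-- def toss_and_score(s):
--     # locate-then-count: find the first "HHH" run, score the prefix by counting
--     i = s.find("HHH")
--     prefix = s if i == -1 else s[:i + 3]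
--     heads = sum(ch == 'H' for ch in prefix)
--     return 3 * heads - len(prefix)
-- ===== Notes on version B (the rewrite author's own statement) =====
-- stated objective: alternative
-- what changed: Replaces the running-accumulator loop with early break by a locate-then-count decomposition: a substring search fixes the stopping prefix (up to and including the third consecutive head), then the score is 3*(heads in prefix) minus the prefix length.
import Mathlib
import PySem

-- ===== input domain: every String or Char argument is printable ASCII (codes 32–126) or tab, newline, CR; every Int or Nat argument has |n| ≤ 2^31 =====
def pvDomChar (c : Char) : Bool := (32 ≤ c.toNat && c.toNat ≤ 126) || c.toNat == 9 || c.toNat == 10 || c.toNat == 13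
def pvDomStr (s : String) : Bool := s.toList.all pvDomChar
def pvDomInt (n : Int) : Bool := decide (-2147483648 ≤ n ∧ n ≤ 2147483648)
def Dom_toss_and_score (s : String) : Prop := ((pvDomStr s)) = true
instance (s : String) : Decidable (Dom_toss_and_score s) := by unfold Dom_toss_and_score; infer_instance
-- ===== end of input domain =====

-- B replaces A's running-accumulator loop (early break at 3 heads) by a
-- locate-then-count decomposition (find "HHH", then score = 3*heads - len of the prefix);
-- same cost, different algorithm.

-- ===== PORT A =====
-- the for-loop with break, state = (score, consecutive_heads)
def tossLoop : List Char → Int → Nat → Int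
  | [], score, _ => score
  | c :: rest, score, k =>
    if c = 'H' then
      if k + 1 = 3 then score + 2 else tossLoop rest (score + 2) (k + 1)
    else
      tossLoop rest (score - 1) 0

def toss_and_score (s : String) : Int := tossLoop s.toList 0 0

-- ===== PORT B =====
def toss_and_score_alt (s : String) : Int :=
  let i := PySem.Str.find s "HHH"
  let pre := if i = -1 then s else PySem.Str.slice s none (some (i + 3))
  let heads : Int := pre.toList.countP (· == 'H')
  3 * heads - PySem.Str.len pre

-- ===== PRECONDITION & SPEC =====
def Spec_toss_and_score (s : String) (out : Int) : Prop := out = toss_and_score_alt s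
instance (s : String) (out : Int) : Decidable (Spec_toss_and_score s out) := by unfold Spec_toss_and_score; infer_instance

-- ===== CLAIM (what is proved, stated in full; the proofs are below) =====
def Claim_equal_toss_and_score : Prop := ∀ (s : String), Dom_toss_and_score s → Spec_toss_and_score s (toss_and_score s)

-- ===== LEMMAS AND PROOFS =====

-- prefix of the input actually consumed by A's loop, starting with k consecutive heads
def takeUpto (k : Nat) : List Char → List Char
  | [] => []
  | c :: rest =>
    if c = 'H' then
      if k + 1 = 3 then [c] else c :: takeUpto (k + 1) rest
    else
      c :: takeUpto 0 rest

-- does the loop break (a run of 3 heads, with k initial credit)?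
def run3 (k : Nat) : List Char → Bool
  | [] => false
  | c :: rest =>
    if c = 'H' then (k + 1 == 3) || run3 (k + 1) rest
    else run3 0 rest

-- length of the consumed prefix when the loop breaks
def stopIdx (k : Nat) : List Char → Nat
  | [] => 0
  | c :: rest =>
    if c = 'H' then
      if k + 1 = 3 then 1 else stopIdx (k + 1) rest + 1
    else
      stopIdx 0 rest + 1

theorem tossLoop_eq (cs : List Char) : ∀ (score : Int) (k : Nat),
    tossLoop cs score k
      = score + 3 * ((takeUpto k cs).countP (· == 'H') : Int) - (takeUpto k cs).length := by
  induction cs with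
  | nil => intro score k; simp [tossLoop, takeUpto]
  | cons c rest ih =>
    intro score k
    by_cases hc : c = 'H'
    · by_cases h3 : k + 1 = 3
      · simp [tossLoop, takeUpto, hc, h3]
        omega
      · simp only [tossLoop, takeUpto, hc, h3, if_true]
        rw [ih]
        simp
        ring
    · simp only [tossLoop, takeUpto, if_neg hc]
      rw [ih]
      simp [hc]
      ring

theorem takeUpto_of_not_run3 (cs : List Char) : ∀ k, run3 k cs = false → takeUpto k cs = cs := by
  induction cs with
  | nil => intro k _; rfl
  | cons c rest ih =>
    intro k h
    by_cases hc : c = 'H'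
    · simp [run3, hc] at h
      have h3 : ¬ (k + 1 = 3) := by omega
      simp [takeUpto, hc, h3, ih _ h.2]
    · simp [run3, hc] at h
      simp [takeUpto, hc, ih _ h]

theorem run3_mono (cs : List Char) : ∀ k k', k ≤ k' → k' ≤ 2 → run3 k cs = true → run3 k' cs = true := by
  induction cs with
  | nil => intro k k' _ _ h; simpa [run3] using h
  | cons c rest ih =>
    intro k k' hkk hk2 h
    by_cases hc : c = 'H'
    · simp [run3, hc] at h ⊢
      rcases h with h | h
      · omega
      · by_cases h3 : k' + 1 = 3
        · omega
        · exact Or.inr (ih (k+1) (k'+1) (by omega) (by omega) h)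
    · simp [run3, hc] at h ⊢
      exact ih 0 0 le_rfl (by omega) h

theorem run3_of_prefix_run (v : List Char) : ∀ (u : List Char),
    run3 0 (u ++ 'H' :: 'H' :: 'H' :: v) = true := by
  intro u
  induction u with
  | nil => simp [run3]
  | cons c u ih =>
    by_cases hc : c = 'H'
    · simp [run3, hc]
      exact run3_mono _ 0 1 (by omega) (by omega) ih
    · simp [run3, hc]
      exact ih

theorem run3_of_infix {cs : List Char} (h : ['H','H','H'] <:+: cs) : run3 0 cs = true := by
  obtain ⟨u, v, huv⟩ := h
  subst huv
  simpa using run3_of_prefix_run v u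

theorem takeUpto_eq_take (cs : List Char) : ∀ k, run3 k cs = true →
    takeUpto k cs = cs.take (stopIdx k cs) := by
  induction cs with
  | nil => intro k h; simp [run3] at h
  | cons c rest ih =>
    intro k h
    by_cases hc : c = 'H'
    · by_cases h3 : k + 1 = 3
      · simp [takeUpto, stopIdx, hc, h3]
      · simp [run3, hc] at h
        rcases h with h | h
        · omega
        · simp [takeUpto, stopIdx, hc, h3, ih _ h]
    · simp [run3, hc] at h
      simp [takeUpto, stopIdx, hc, ih _ h]

theorem not_prefix_HHH_pad {m : Nat} {c : Char} {rest : List Char}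
    (hm : m ≤ 2) (hc : c ≠ 'H') :
    ¬ ['H','H','H'] <+: (List.replicate m 'H' ++ c :: rest) := by
  interval_cases m <;> simp [List.cons_prefix_cons] <;>
    exact fun h => absurd h.symm hc

theorem stopIdx_spec (cs : List Char) : ∀ k, k ≤ 2 → run3 k cs = true →
    3 - k ≤ stopIdx k cs ∧
    ['H','H','H'] <+: (List.replicate k 'H' ++ cs).drop (k + stopIdx k cs - 3) ∧
    ∀ j < k + stopIdx k cs - 3, ¬ ['H','H','H'] <+: (List.replicate k 'H' ++ cs).drop j := by
  induction cs with
  | nil => intro k _ h; simp [run3] at h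
  | cons c rest ih =>
    intro k hk h
    by_cases hc : c = 'H'
    · by_cases h3 : k + 1 = 3
      · have hk2 : k = 2 := by omega
        subst hk2; subst hc
        refine ⟨by simp [stopIdx], ?_, ?_⟩
        · simp [stopIdx, List.replicate]
        · intro j hj; simp [stopIdx] at hj
      · simp [run3, hc] at h
        rcases h with h | h
        · omega
        · have ihh := ih (k + 1) (by omega) h
          have hrw : List.replicate k 'H' ++ c :: rest
              = List.replicate (k + 1) 'H' ++ rest := by
            subst hc
            simp [List.replicate_succ']
          have hstop : stopIdx k (c :: rest) = stopIdx (k + 1) rest + 1 := by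
            simp [stopIdx, hc, h3]
          rw [hrw, hstop]
          refine ⟨by omega, ?_, ?_⟩
          · have : k + (stopIdx (k + 1) rest + 1) - 3 = k + 1 + stopIdx (k + 1) rest - 3 := by omega
            rw [this]; exact ihh.2.1
          · intro j hj
            exact ihh.2.2 j (by omega)
    · simp [run3, hc] at h
      have ihh := ih 0 (by omega) h
      have hstop : stopIdx k (c :: rest) = stopIdx 0 rest + 1 := by
        simp [stopIdx, hc]
      rw [hstop]
      have h2 : List.replicate k 'H' ++ c :: rest
          = (List.replicate k 'H' ++ [c]) ++ rest := by simp
      have hl1 : (List.replicate k 'H' ++ [c]).length = k + 1 := by simp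
      refine ⟨by omega, ?_, ?_⟩
      · have hdrop : (List.replicate k 'H' ++ c :: rest).drop (k + (stopIdx 0 rest + 1) - 3)
            = rest.drop (stopIdx 0 rest - 3) := by
          rw [h2, show k + (stopIdx 0 rest + 1) - 3
              = (List.replicate k 'H' ++ [c]).length + (stopIdx 0 rest - 3) by rw [hl1]; omega]
          exact List.drop_length_add_append _
        rw [hdrop]
        simpa using ihh.2.1
      · intro j hj
        by_cases hjk : k + 1 ≤ j
        · have hdrop : (List.replicate k 'H' ++ c :: rest).drop j = rest.drop (j - (k + 1)) := by
            conv_lhs =>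
              rw [h2, show j = (List.replicate k 'H' ++ [c]).length + (j - (k + 1)) by
                rw [hl1]; omega]
            exact List.drop_length_add_append _
          rw [hdrop]
          have := ihh.2.2 (j - (k + 1)) (by omega)
          simpa using this
        · have hdrop : (List.replicate k 'H' ++ c :: rest).drop j
              = List.replicate (k - j) 'H' ++ c :: rest := by
            rw [List.drop_append_of_le_length (by simp; omega)]
            congr 1
            simp
          rw [hdrop]
          exact not_prefix_HHH_pad (by omega) hc

theorem find_eq_stopIdx {cs : List Char} (h : run3 0 cs = true) :
    PySem.Chars.find cs ['H','H','H'] = (stopIdx 0 cs : Int) - 3 := by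
  obtain ⟨h3, hpre, hmin⟩ := stopIdx_spec cs 0 (by omega) h
  simp only [List.replicate, List.nil_append, Nat.zero_add] at hpre hmin
  have hinf : ['H','H','H'] <:+: cs := by
    obtain ⟨w, hw⟩ := hpre
    exact ⟨cs.take (stopIdx 0 cs - 3), w, by
      rw [List.append_assoc, hw, List.take_append_drop]⟩
  have hnn : 0 ≤ PySem.Chars.find cs ['H','H','H'] :=
    (PySem.Chars.find_nonneg_iff cs _).mpr hinf
  obtain ⟨hfpre, hfmin⟩ := PySem.Chars.find_spec hnn
  set f := (PySem.Chars.find cs ['H','H','H']).toNat with hf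
  have hfe : f = stopIdx 0 cs - 3 := by
    rcases Nat.lt_trichotomy f (stopIdx 0 cs - 3) with hlt | heq | hgt
    · exact absurd hfpre (hmin f hlt)
    · exact heq
    · exact absurd hpre (hfmin _ hgt)
  omega

theorem toss_and_score_eq (s : String) : toss_and_score s = toss_and_score_alt s := by
  unfold toss_and_score toss_and_score_alt
  set cs := s.toList with hcs
  by_cases h : run3 0 cs = true
  · have hfind : PySem.Str.find s "HHH" = (stopIdx 0 cs : Int) - 3 := by
      rw [PySem.Str.find_eq, ← hcs]
      exact find_eq_stopIdx h
    have h3 : 3 ≤ stopIdx 0 cs := (stopIdx_spec cs 0 (by omega) h).1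
    have hne : ¬ ((stopIdx 0 cs : Int) - 3 = -1) := by omega
    simp only [hfind, hne, if_false]
    have hb : (stopIdx 0 cs : Int) - 3 + 3 = ((stopIdx 0 cs : Nat) : Int) := by omega
    rw [tossLoop_eq, takeUpto_eq_take cs 0 h]
    simp only [PySem.Str.len_eq, PySem.Str.toList_slice, PySem.Chars.slice_eq_listSlice, ← hcs,
      hb, PySem.List.slice_to_natCast]
    ring
  · have hnotinf : ¬ ['H','H','H'] <:+: cs := fun hi => h (run3_of_infix hi)
    have hfind : PySem.Str.find s "HHH" = -1 := by
      rw [PySem.Str.find_eq, ← hcs]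
      exact (PySem.Chars.find_eq_neg_one_iff cs _).mpr (by simpa using hnotinf)
    simp only [hfind, if_true]
    rw [tossLoop_eq, takeUpto_of_not_run3 cs 0 (by simpa using h), PySem.Str.len_eq, ← hcs]
    ring

-- ===== VERDICT (by name: the statement is the Claim_ definition above) =====
theorem toss_and_score_spec : Claim_equal_toss_and_score := by
  intro s _
  exact toss_and_score_eq s
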